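-- pv_equiv track=rewrite | github.com/erikbern/advent-of-code-2020 | day_14.py | recurse
-- ===== SOURCE A (Python) =====
-- def recurse(patterns, mask):
--     if not patterns:
--         return 0
--
--     # Find any bit that (a) mask[i] == 'X' (b) at least one pattern has bit[i] set to '0' or '1'
--     for i in range(36):
--         if mask[i] != 'X': continue
--         if not any(pattern[i] in '01' for pattern, value in patterns): continue
--         break
--     else:
--         # No bit found, so just use the last pattern's value for all remaining positions
--         pattern, value = patterns[-1]
--         return 2**sum(1 for bit in mask if bit == 'X') * value
--
--     # Bit found. Split patterns into two subpatterns and recurse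
--     mask_0 = ['0' if j == i else bit for j, bit in enumerate(mask)]
--     mask_1 = ['1' if j == i else bit for j, bit in enumerate(mask)]
--     patterns_0 = [(pattern, value) for pattern, value in patterns if pattern[i] in '0X']
--     patterns_1 = [(pattern, value) for pattern, value in patterns if pattern[i] in '1X']
--     return recurse(patterns_0, mask_0) + recurse(patterns_1, mask_1)
-- ===== SOURCE B (Python) =====
-- def recurse(patterns, mask):
--     # Iterative left-to-right sweep over bit positions with a worklist of
--     # (surviving patterns, address-multiplier) states instead of recursive splitting.
--     if not patterns:
--         return 0
--     states = [(patterns, 1)]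
--     for i in range(36):
--         if mask[i] != 'X':
--             continue
--         new_states = []
--         for group, count in states:
--             if any(p[i] in '01' for p, _ in group):
--                 lo = [(p, v) for p, v in group if p[i] in '0X']
--                 hi = [(p, v) for p, v in group if p[i] in '1X']
--                 if lo:
--                     new_states.append((lo, count))
--                 if hi:
--                     new_states.append((hi, count))
--             else:
--                 new_states.append((group, 2 * count))
--         states = new_states
--     tail = 2 ** sum(1 for bit in mask[36:] if bit == 'X')
--     return tail * sum(count * group[-1][1] for group, count in states)
-- ===== Notes on version B (the rewrite author's own statement) =====
-- stated objective: alternative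
-- what changed: Replaces A's recursive hypercube splitting (find the first relevant floating bit, rebuild the mask, recurse on two filtered pattern lists) by a single iterative left-to-right sweep over the 36 bit positions maintaining a worklist of (surviving-patterns, address-multiplier) states, finished by one closed-form weighted sum.
import Mathlib
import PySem

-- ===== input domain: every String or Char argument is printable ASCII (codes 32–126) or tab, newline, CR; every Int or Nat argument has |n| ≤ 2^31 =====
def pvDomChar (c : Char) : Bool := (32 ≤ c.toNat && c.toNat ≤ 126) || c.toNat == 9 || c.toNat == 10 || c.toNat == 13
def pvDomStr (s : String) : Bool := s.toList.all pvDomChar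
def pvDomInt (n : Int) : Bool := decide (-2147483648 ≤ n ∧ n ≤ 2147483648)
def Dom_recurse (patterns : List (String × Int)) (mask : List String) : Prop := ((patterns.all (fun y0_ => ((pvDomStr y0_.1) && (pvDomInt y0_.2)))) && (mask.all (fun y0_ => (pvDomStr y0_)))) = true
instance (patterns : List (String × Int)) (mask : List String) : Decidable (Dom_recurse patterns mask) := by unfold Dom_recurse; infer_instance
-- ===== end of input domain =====

-- B replaces A's recursive bit-splitting by one iterative sweep over the 36 positions with a
-- worklist of (surviving patterns, multiplier) states; same return value (alternative, not faster).

-- ===== PORT A =====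
-- `s[i] in '<a><b>'` for a character index i (IndexError → false; unreachable under Pre_)
def pvCharIn2 (s : String) (i : Nat) (a b : Char) : Bool :=
  match PySem.Str.pyGet? s (i : Int) with
  | some c => c == a || c == b
  | none => false

-- `any(pattern[i] in '01' for pattern, value in patterns)`
def pvHasBit (patterns : List (String × Int)) (i : Nat) : Bool :=
  patterns.any (fun pv => pvCharIn2 pv.1 i '0' '1')

-- `mask[i] == 'X'` (IndexError → default "" ≠ "X"; unreachable under Pre_)
def pvMaskX (mask : List String) (i : Nat) : Bool :=
  PySem.List.pyGetD mask (i : Int) "" == "X"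

-- `['0' if j == i else bit for j, bit in enumerate(mask)]`
def pvSetBit (mask : List String) (i : Nat) (b : String) : List String :=
  (PySem.List.enumerate mask).map (fun jb => if jb.1 == (i : Int) then b else jb.2)

-- number of floating positions among the 36 scanned bits: A's termination measure
def pvX36 (mask : List String) : Nat :=
  ((List.range 36).filter (fun j => pvMaskX mask j)).length

lemma pvSetBit_eq_set (mask : List String) (i : Nat) (b : String) :
    pvSetBit mask i b = mask.set i b := by
  apply List.ext_getElem?
  intro k
  rw [pvSetBit, List.getElem?_map, PySem.List.getElem?_enumerate, List.getElem?_set]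
  cases h : mask[k]? with
  | none =>
      have hk : mask.length ≤ k := by
        by_contra hk
        exact absurd h (by simp [List.getElem?_eq_getElem (by omega : k < mask.length)])
      simp only [Option.map_none]
      split_ifs with h1 h2
      · omega
      · rfl
      · rfl
  | some x =>
      have hk : k < mask.length := by
        by_contra hk
        rw [List.getElem?_eq_none (by omega : mask.length ≤ k)] at h
        cases h
      simp only [Option.map_some]
      by_cases hik : i = k
      · subst hik
        have hc : ((0 : Int) + (i : Int) == (i : Int)) = true := by simp
        simp [hc, hk]
      · rw [if_neg hik]
        have hc : ((0 : Int) + (k : Int) == (i : Int)) = false := by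
          simp; omega
        simp [hc]
        exact fun hki => absurd hki.symm hik

lemma pvMaskX_lt_length {mask : List String} {i : Nat} (h : pvMaskX mask i = true) :
    i < mask.length := by
  by_contra hi
  simp [pvMaskX, List.getD, List.getElem?_eq_none (by omega : mask.length ≤ i)] at h

lemma pvMaskX_set_self {mask : List String} {i : Nat} (h : i < mask.length) (b : String) :
    pvMaskX (mask.set i b) i = (b == "X") := by
  simp [pvMaskX, List.getD, List.getElem?_set, h]

lemma pvMaskX_set_ne (mask : List String) {i j : Nat} (h : j ≠ i) (b : String) :
    pvMaskX (mask.set i b) j = pvMaskX mask j := by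
  have h' : i ≠ j := Ne.symm h
  simp [pvMaskX, List.getD, List.getElem?_set, h']

lemma pv_countP_lt {α : Type} (p q : α → Bool) :
    ∀ (l : List α), (∀ x ∈ l, q x = true → p x = true) →
    ∀ i ∈ l, p i = true → q i = false →
    (l.filter q).length < (l.filter p).length := by
  intro l
  induction l with
  | nil => intro _ i hi; simp at hi
  | cons a l ih =>
    intro hmono i hi hpi hqi
    have hmono' : ∀ x ∈ l, q x = true → p x = true := fun x hx => hmono x (by simp [hx])
    have hle : (l.filter q).length ≤ (l.filter p).length := by
      simpa [List.countP_eq_length_filter] using List.countP_mono_left (l := l)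
        (p := q) (q := p) (fun x hx hq => hmono' x hx hq)
    rcases List.mem_cons.mp hi with rfl | hi'
    · simp only [List.filter_cons, hpi, hqi]
      simpa using Nat.lt_succ_of_le hle
    · have hlt := ih hmono' i hi' hpi hqi
      by_cases hqa : q a = true
      · have hpa := hmono a (by simp) hqa
        simp only [List.filter_cons, hqa, hpa]
        simpa using hlt
      · have hqa' : q a = false := by
          cases hq2 : q a
          · rfl
          · exact absurd hq2 hqa
        simp only [List.filter_cons, hqa', Bool.false_eq_true, if_false]
        cases hpa : p a <;> simp [hpa] <;> omega

lemma pvX36_set_lt {mask : List String} {i : Nat} (hi : i < 36)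
    (hX : pvMaskX mask i = true) (b : String) (hb : (b == "X") = false) :
    pvX36 (mask.set i b) < pvX36 mask := by
  have hlen := pvMaskX_lt_length hX
  apply pv_countP_lt
  · intro j hj hq
    by_cases hji : j = i
    · subst hji; rw [pvMaskX_set_self hlen b] at hq; rw [hq] at hb; cases hb
    · rwa [pvMaskX_set_ne mask hji b] at hq
  · simpa using hi
  · exact hX
  · rw [pvMaskX_set_self hlen b]; exact hb

-- port of A: find the first relevant floating bit, split patterns and mask, recurse
def recurse (patterns : List (String × Int)) (mask : List String) : Int :=
  if patterns = [] then 0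
  else
    match h : (List.range 36).find? (fun i => pvMaskX mask i && pvHasBit patterns i) with
    | none =>
        2 ^ (mask.countP (fun bit => bit == "X")) * (patterns.getLastD ("", 0)).2
    | some i =>
        recurse (patterns.filter (fun pv => pvCharIn2 pv.1 i '0' 'X')) (pvSetBit mask i "0")
        + recurse (patterns.filter (fun pv => pvCharIn2 pv.1 i '1' 'X')) (pvSetBit mask i "1")
termination_by pvX36 mask
decreasing_by
  all_goals
    rw [pvSetBit_eq_set]
    have hmem := List.mem_of_find?_eq_some h
    have hpred := List.find?_some h
    have hi : i < 36 := by simpa using hmem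
    have hX : pvMaskX mask i = true := by
      have h2 : pvMaskX mask i = true ∧ pvHasBit patterns i = true := by simpa using hpred
      exact h2.1
    exact pvX36_set_lt hi hX _ (by decide)

-- ===== PORT B =====
-- one sweep step at position i: split, drop-empty or double each state
def pvStep (mask : List String) (states : List (List (String × Int) × Int)) (i : Nat) :
    List (List (String × Int) × Int) :=
  if pvMaskX mask i then
    states.flatMap (fun (gc : List (String × Int) × Int) =>
      if pvHasBit gc.1 i then
        let lows := gc.1.filter (fun pv => pvCharIn2 pv.1 i '0' 'X')
        let highs := gc.1.filter (fun pv => pvCharIn2 pv.1 i '1' 'X')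
        (if lows = [] then ([] : List (List (String × Int) × Int)) else [(lows, gc.2)])
          ++ (if highs = [] then [] else [(highs, gc.2)])
      else [(gc.1, 2 * gc.2)])
  else states

-- port of B: iterative sweep over positions 0..35 with a worklist, then one weighted sum
def recurse_alt (patterns : List (String × Int)) (mask : List String) : Int :=
  if patterns = [] then 0
  else
    let states := (List.range 36).foldl (pvStep mask) [(patterns, 1)]
    let tail : Int :=
      2 ^ ((PySem.List.slice mask (some ((36 : Nat) : Int)) none).countP (fun bit => bit == "X"))
    tail * states.foldl (fun acc gc => acc + gc.2 * (gc.1.getLastD ("", 0)).2) 0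

-- ===== PRECONDITION & SPEC =====
-- Pre_ excludes inputs with a nonempty pattern list but a mask of fewer than 36 entries or a
-- pattern shorter than 36 characters, on which Python A in general raises IndexError; the bound
-- is slightly stronger than the exact raising condition (a short pattern only raises when a
-- floating mask position actually probes it).
def Pre_recurse (patterns : List (String × Int)) (mask : List String) : Prop :=
  patterns = [] ∨ (36 ≤ mask.length ∧ ∀ pv ∈ patterns, 36 ≤ pv.1.length)
instance (patterns : List (String × Int)) (mask : List String) : Decidable (Pre_recurse patterns mask) := by
  unfold Pre_recurse; infer_instance

def pvWitness_recurse : (List (String × Int)) × List String :=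
  ([("0X0X0X0X0X0X0X0X0X0X0X0X0X0X0X0X0X0X", 7), ("1X1X1X1X1X1X1X1X1X1X1X1X1X1X1X1X1X1X", 3)],
   ["X", "X", "1", "0", "X", "X", "X", "X", "X", "0", "1", "X", "X", "X", "X", "X", "X", "X",
    "X", "X", "X", "0", "X", "X", "X", "X", "X", "X", "1", "X", "X", "X", "X", "X", "X", "X"])

def Spec_recurse (patterns : List (String × Int)) (mask : List String) (out : Int) : Prop := out = recurse_alt patterns mask
instance (patterns : List (String × Int)) (mask : List String) (out : Int) : Decidable (Spec_recurse patterns mask out) := by unfold Spec_recurse; infer_instance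

-- ===== CLAIM (what is proved, stated in full; the proofs are below) =====
def Claim_equal_recurse : Prop := ∀ (patterns : List (String × Int)) (mask : List String), Dom_recurse patterns mask → Pre_recurse patterns mask → Spec_recurse patterns mask (recurse patterns mask)

-- ===== LEMMAS AND PROOFS =====

-- per-address semantics: scan the listed positions in order, filtering the survivors
def pvG : List Nat → List String → List (String × Int) → Int
  | [], _, P => if P = [] then 0 else (P.getLastD ("", 0)).2
  | k :: ks, mask, P =>
    if P = [] then 0
    else if pvMaskX mask k = false then pvG ks mask P
    else if pvHasBit P k = false then 2 * pvG ks mask P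
    else pvG ks mask (P.filter (fun pv => pvCharIn2 pv.1 k '0' 'X'))
         + pvG ks mask (P.filter (fun pv => pvCharIn2 pv.1 k '1' 'X'))

def pvXin (ks : List Nat) (mask : List String) : Nat :=
  (ks.filter (fun j => pvMaskX mask j)).length

lemma pvG_nil (ks : List Nat) (mask : List String) : pvG ks mask [] = 0 := by
  cases ks <;> simp [pvG]

lemma pvG_congr {m1 m2 : List String} (ks : List Nat)
    (h : ∀ j ∈ ks, pvMaskX m1 j = pvMaskX m2 j) (P : List (String × Int)) :
    pvG ks m1 P = pvG ks m2 P := by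
  induction ks generalizing P with
  | nil => rfl
  | cons k ks ih =>
    have hk : pvMaskX m1 k = pvMaskX m2 k := h k (by simp)
    have h' : ∀ j ∈ ks, pvMaskX m1 j = pvMaskX m2 j := fun j hj => h j (by simp [hj])
    simp only [pvG, hk, ih h']

lemma pvXin_congr {m1 m2 : List String} (ks : List Nat)
    (h : ∀ j ∈ ks, pvMaskX m1 j = pvMaskX m2 j) : pvXin ks m1 = pvXin ks m2 := by
  unfold pvXin
  rw [List.filter_congr h]

lemma pvXin_append (ks1 ks2 : List Nat) (mask : List String) :
    pvXin (ks1 ++ ks2) mask = pvXin ks1 mask + pvXin ks2 mask := by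
  simp [pvXin, List.filter_append]

lemma pvG_skip (mask : List String) (ks1 ks2 : List Nat) (P : List (String × Int))
    (h : ∀ j ∈ ks1, pvMaskX mask j = true → pvHasBit P j = false) :
    pvG (ks1 ++ ks2) mask P = 2 ^ (pvXin ks1 mask) * pvG ks2 mask P := by
  induction ks1 with
  | nil => simp [pvXin]
  | cons k ks ih =>
    have h' : ∀ j ∈ ks, pvMaskX mask j = true → pvHasBit P j = false :=
      fun j hj => h j (by simp [hj])
    by_cases hP : P = []
    · subst hP; simp [pvG_nil]
    · cases hX : pvMaskX mask k with
      | false =>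
        have e1 : pvG ((k :: ks) ++ ks2) mask P = pvG (ks ++ ks2) mask P := by
          simp [pvG, hP, hX]
        have e2 : pvXin (k :: ks) mask = pvXin ks mask := by
          simp [pvXin, List.filter_cons, hX]
        rw [e1, e2, ih h']
      | true =>
        have hB : pvHasBit P k = false := h k (by simp) hX
        have e1 : pvG ((k :: ks) ++ ks2) mask P = 2 * pvG (ks ++ ks2) mask P := by
          rw [List.cons_append]
          simp [pvG, hP, hX, hB]
        have e2 : pvXin (k :: ks) mask = pvXin ks mask + 1 := by
          simp [pvXin, List.filter_cons, hX]
        rw [e1, e2, ih h', pow_succ]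
        push_cast
        ring

lemma pvHasBit_filter_false {P : List (String × Int)} {j : Nat}
    (h : pvHasBit P j = false) (q : String × Int → Bool) :
    pvHasBit (P.filter q) j = false := by
  simp only [pvHasBit, List.any_eq_false] at h ⊢
  exact fun pv hpv => h pv (List.mem_of_mem_filter hpv)

lemma pvXin_range_eq (mask : List String) :
    ∀ n, pvXin (List.range n) mask = (mask.take n).countP (fun b => b == "X") := by
  intro n
  induction n with
  | zero => simp [pvXin]
  | succ n ih =>
    rw [List.range_succ, pvXin_append, ih, List.take_succ, List.countP_append]
    congr 1
    simp only [pvXin, List.filter_cons, List.filter_nil]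
    cases h : mask[n]? with
    | none =>
        have : pvMaskX mask n = false := by
          simp [pvMaskX, List.getD, h]
        simp [this, h]
    | some x =>
        have hmx : pvMaskX mask n = (x == "X") := by
          simp [pvMaskX, List.getD, h]
        cases hx : (x == "X") <;> simp [List.filter_cons, hmx, hx]

lemma pv_countP_split (mask : List String) :
    mask.countP (fun b => b == "X")
      = pvXin (List.range 36) mask + (mask.drop 36).countP (fun b => b == "X") := by
  rw [pvXin_range_eq]
  rw [← List.countP_append, List.take_append_drop]

lemma pv_find?_range_min {n : Nat} {p : Nat → Bool} {i : Nat}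
    (h : (List.range n).find? p = some i) : ∀ j < i, p j = false := by
  induction n generalizing i with
  | zero => simp at h
  | succ n ih =>
    rw [List.range_succ, List.find?_append] at h
    cases hn : (List.range n).find? p with
    | some i' =>
        rw [hn, Option.some_or] at h
        cases h
        exact ih hn
    | none =>
        rw [hn, Option.none_or] at h
        have hni : n = i := by
          cases hp : p n with
          | true => simpa [List.find?, hp] using h
          | false => exfalso; simp [List.find?, hp] at h
        subst hni
        intro j hj
        simpa using List.find?_eq_none.mp hn j (List.mem_range.mpr hj)

lemma pv_range'_glue (s m n : Nat) :
    List.range' s m ++ List.range' (s + m) n = List.range' s (m + n) := by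
  have h := List.range'_append (s := s) (m := m) (n := n) (step := 1)
  simpa using h

-- the main characterisation of A: A = tail-power times the positional scan pvG
lemma pvA_eq_g : ∀ (n : Nat) (mask : List String) (P : List (String × Int)) (k : Nat),
    pvX36 mask = n → k ≤ 36 →
    (∀ j, j < k → pvMaskX mask j = true → pvHasBit P j = false) →
    recurse P mask
      = 2 ^ (pvXin (List.range k) mask + (mask.drop 36).countP (fun b => b == "X"))
        * pvG (List.range' k (36 - k)) mask P := by
  intro n
  induction n using Nat.strong_induction_on with
  | _ n ih =>
    intro mask P k hn hk hirr
    by_cases hP : P = []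
    · subst hP
      rw [recurse]
      simp [pvG_nil]
    · rw [recurse]
      simp only [if_neg hP]
      cases hfind : (List.range 36).find? (fun i => pvMaskX mask i && pvHasBit P i) with
      | none =>
        have hall : ∀ j ∈ List.range' k (36 - k), pvMaskX mask j = true → pvHasBit P j = false := by
          intro j hj hX
          have hj36 : j < 36 := by
            have := List.mem_range'.mp hj; omega
          have := List.find?_eq_none.mp hfind j (by simp [hj36])
          simpa [hX] using this
        have := pvG_skip mask (List.range' k (36 - k)) [] P hall
        rw [List.append_nil] at this
        rw [this]
        have hsplit : List.range k ++ List.range' k (36 - k) = List.range 36 := by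
          rw [List.range_eq_range', List.range_eq_range']
          have := pv_range'_glue 0 k (36 - k)
          simp only [Nat.zero_add] at this
          rw [this, show k + (36 - k) = 36 from by omega]
        have hxin : pvXin (List.range k) mask + pvXin (List.range' k (36 - k)) mask
            = pvXin (List.range 36) mask := by
          rw [← pvXin_append, hsplit]
        rw [pv_countP_split]
        simp only [pvG, if_neg hP]
        rw [← hxin]
        ring
      | some i =>
        have hi36 : i < 36 := by simpa using List.mem_of_find?_eq_some hfind
        have hpred := List.find?_some hfind
        have hXB : pvMaskX mask i = true ∧ pvHasBit P i = true := by simpa using hpred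
        have hX : pvMaskX mask i = true := hXB.1
        have hB : pvHasBit P i = true := hXB.2
        have hlen : i < mask.length := pvMaskX_lt_length hX
        have hmin : ∀ j < i, pvMaskX mask j = true → pvHasBit P j = false := by
          intro j hj hXj
          have := pv_find?_range_min hfind j hj
          simpa [hXj] using this
        have hki : k ≤ i := by
          by_contra hki
          have := hirr i (by omega) hX
          rw [this] at hB; cases hB
        -- the two recursive calls, via the induction hypothesis at k' = i + 1
        have hrec : ∀ b : String, (b == "X") = false →
            ∀ q : String × Int → Bool,
            recurse (P.filter q) (mask.set i b)
              = 2 ^ (pvXin (List.range i) mask + (mask.drop 36).countP (fun c => c == "X"))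
                * pvG (List.range' (i + 1) (36 - (i + 1))) mask (P.filter q) := by
          intro b hb q
          have hlt : pvX36 (mask.set i b) < n := hn ▸ pvX36_set_lt hi36 hX b hb
          have hirr' : ∀ j, j < i + 1 → pvMaskX (mask.set i b) j = true
              → pvHasBit (P.filter q) j = false := by
            intro j hj hXj
            by_cases hji : j = i
            · subst hji
              rw [pvMaskX_set_self hlen b, hb] at hXj; cases hXj
            · rw [pvMaskX_set_ne mask hji b] at hXj
              have hfalse : pvHasBit P j = false := by
                rcases Nat.lt_or_ge j k with h1 | h1
                · exact hirr j h1 hXj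
                · exact hmin j (by omega) hXj
              exact pvHasBit_filter_false hfalse q
          have := ih _ hlt (mask.set i b) (P.filter q) (i + 1) rfl (by omega) hirr'
          rw [this]
          have hdrop : (mask.set i b).drop 36 = mask.drop 36 := by
            rw [List.drop_set, if_pos (by omega : i < 36)]
          have hxin : pvXin (List.range (i + 1)) (mask.set i b) = pvXin (List.range i) mask := by
            rw [List.range_succ, pvXin_append]
            have h1 : pvXin (List.range i) (mask.set i b) = pvXin (List.range i) mask := by
              apply pvXin_congr
              intro j hj
              exact pvMaskX_set_ne mask (by simp at hj; omega) b
            have h2 : pvXin [i] (mask.set i b) = 0 := by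
              simp [pvXin, pvMaskX_set_self hlen b, hb]
            rw [h1, h2]
            omega
          have hG : pvG (List.range' (i + 1) (36 - (i + 1))) (mask.set i b) (P.filter q)
              = pvG (List.range' (i + 1) (36 - (i + 1))) mask (P.filter q) := by
            apply pvG_congr
            intro j hj
            have := List.mem_range'.mp hj
            exact pvMaskX_set_ne mask (by omega) b
          rw [hdrop, hxin, hG]
        -- rewrite the goal's pvG: skip k..i-1, split at i
        have hsplit : List.range' k (36 - k)
            = List.range' k (i - k) ++ (i :: List.range' (i + 1) (36 - (i + 1))) := by
          have : i :: List.range' (i + 1) (36 - (i + 1)) = List.range' i (36 - i) := by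
            have h36 : 36 - i = (36 - (i + 1)) + 1 := by omega
            rw [h36]; rfl
          rw [this]
          have hg := pv_range'_glue k (i - k) (36 - i)
          rw [show k + (i - k) = i from by omega] at hg
          rw [hg, show (i - k) + (36 - i) = 36 - k from by omega]
        have hskip : ∀ j ∈ List.range' k (i - k), pvMaskX mask j = true → pvHasBit P j = false := by
          intro j hj hXj
          have := List.mem_range'.mp hj
          exact hmin j (by omega) hXj
        rw [hsplit, pvG_skip mask _ _ P hskip]
        simp only [pvG, if_neg hP, hX, hB, Bool.true_eq_false, if_false]
        have hxin2 : pvXin (List.range k) mask + pvXin (List.range' k (i - k)) mask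
            = pvXin (List.range i) mask := by
          rw [← pvXin_append]
          congr 1
          rw [List.range_eq_range', List.range_eq_range']
          have := pv_range'_glue 0 k (i - k)
          simp only [Nat.zero_add] at this
          rw [show k + (i - k) = i from by omega] at this
          rw [this]
        rw [pvSetBit_eq_set, pvSetBit_eq_set,
            hrec "0" (by decide) _, hrec "1" (by decide) _]
        rw [← hxin2]
        ring

-- the B-side invariant: weighted sum of pvG over the worklist
lemma pvStep_head (mask : List String) (k : Nat) (ks : List Nat) (gc : List (String × Int) × Int) :
    (((if pvHasBit gc.1 k then
        (if gc.1.filter (fun pv => pvCharIn2 pv.1 k '0' 'X') = [] then ([] : List (List (String × Int) × Int))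
         else [(gc.1.filter (fun pv => pvCharIn2 pv.1 k '0' 'X'), gc.2)]) ++
        (if gc.1.filter (fun pv => pvCharIn2 pv.1 k '1' 'X') = [] then []
         else [(gc.1.filter (fun pv => pvCharIn2 pv.1 k '1' 'X'), gc.2)])
      else [(gc.1, 2 * gc.2)]).map (fun x => x.2 * pvG ks mask x.1)).sum : Int)
      = gc.2 * (if pvHasBit gc.1 k = false then 2 * pvG ks mask gc.1
          else pvG ks mask (gc.1.filter (fun pv => pvCharIn2 pv.1 k '0' 'X'))
               + pvG ks mask (gc.1.filter (fun pv => pvCharIn2 pv.1 k '1' 'X'))) := by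
  cases hB : pvHasBit gc.1 k with
  | false => simp [hB]; ring
  | true =>
    simp only [hB, if_true, Bool.true_eq_false, if_false]
    rw [List.map_append, List.sum_append]
    by_cases h0 : gc.1.filter (fun pv => pvCharIn2 pv.1 k '0' 'X') = [] <;>
      by_cases h1 : gc.1.filter (fun pv => pvCharIn2 pv.1 k '1' 'X') = [] <;>
        simp [h0, h1, pvG_nil] <;> ring

lemma pvG_cons_eval (mask : List String) (k : Nat) (ks : List Nat)
    (P : List (String × Int)) (hX : pvMaskX mask k = true) :
    pvG (k :: ks) mask P
      = (if pvHasBit P k = false then 2 * pvG ks mask P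
          else pvG ks mask (P.filter (fun pv => pvCharIn2 pv.1 k '0' 'X'))
               + pvG ks mask (P.filter (fun pv => pvCharIn2 pv.1 k '1' 'X'))) := by
  by_cases hP : P = []
  · subst hP
    have hB : pvHasBit ([] : List (String × Int)) k = false := by simp [pvHasBit]
    simp [pvG_nil, hB]
  · simp [pvG, hP, hX]

lemma pvStep_sum (mask : List String) (k : Nat) (ks : List Nat)
    (S : List (List (String × Int) × Int)) :
    ((pvStep mask S k).map (fun gc => gc.2 * pvG ks mask gc.1)).sum
      = (S.map (fun gc => gc.2 * pvG (k :: ks) mask gc.1)).sum := by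
  cases hX : pvMaskX mask k with
  | false =>
    simp only [pvStep, hX, Bool.false_eq_true, if_false]
    apply congrArg
    apply List.map_congr_left
    intro gc _
    by_cases hP : gc.1 = []
    · simp [hP, pvG_nil]
    · simp [pvG, hP, hX]
  | true =>
    simp only [pvStep, hX, if_true]
    rw [List.map_flatMap, List.flatMap_def, List.sum_flatten, List.map_map]
    apply congrArg
    apply List.map_congr_left
    intro gc _
    simp only [Function.comp_apply]
    rw [pvStep_head mask k ks gc, pvG_cons_eval mask k ks gc.1 hX]

lemma pv_fold_sum (mask : List String) :
    ∀ (ks : List Nat) (S : List (List (String × Int) × Int)),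
    ((ks.foldl (pvStep mask) S).map (fun gc => gc.2 * pvG [] mask gc.1)).sum
      = (S.map (fun gc => gc.2 * pvG ks mask gc.1)).sum := by
  intro ks
  induction ks with
  | nil => intro S; rfl
  | cons k ks ih =>
    intro S
    rw [List.foldl_cons, ih (pvStep mask S k), pvStep_sum]

lemma pv_foldl_add {α : Type} (f : α → Int) :
    ∀ (l : List α) (a : Int), l.foldl (fun acc x => acc + f x) a = a + (l.map f).sum := by
  intro l
  induction l with
  | nil => intro a; simp
  | cons x l ih => intro a; rw [List.foldl_cons, ih]; simp; ring

lemma pvG_nil_eq_last (mask : List String) (gc : List (String × Int) × Int) :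
    gc.2 * (gc.1.getLastD ("", 0)).2 = gc.2 * pvG [] mask gc.1 := by
  by_cases hP : gc.1 = [] <;> simp [pvG, hP]

-- ===== VERDICT (by name: the statement is the Claim_ definition above) =====
theorem recurse_spec : Claim_equal_recurse := by
  intro patterns mask _ hpre
  unfold Spec_recurse
  by_cases hP : patterns = []
  · subst hP
    rw [recurse, recurse_alt]
    simp
  · have hA := pvA_eq_g (pvX36 mask) mask patterns 0 rfl (by omega) (by omega)
    have hxin0 : pvXin (List.range 0) mask = 0 := by simp [pvXin]
    rw [hxin0, Nat.zero_add] at hA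
    have hrange : List.range' 0 36 = List.range 36 := List.range_eq_range'.symm
    rw [hrange] at hA
    rw [hA, recurse_alt]
    simp only [if_neg hP]
    have hslice : PySem.List.slice mask (some ((36 : Nat) : Int)) none = mask.drop 36 :=
      PySem.List.slice_from_natCast mask 36
    rw [hslice]
    rw [pv_foldl_add]
    rw [List.map_congr_left (fun gc _ => pvG_nil_eq_last mask gc)]
    rw [pv_fold_sum]
    simp
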